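-- pv_equiv track=rewrite | github.com/KZdavid/starraildata-reader | src/starraildatareader/starraildata.py | get_stable_hash
-- ===== SOURCE A (Python) =====
-- def get_stable_hash(string: str) -> int:
--     hash1 = 5381
--     hash2 = hash1
--
--     for i in range(0, len(string), 2):
--         hash1 = ((hash1 << 5) + hash1) & 0xFFFFFFFF ^ ord(string[i])
--         if i == len(string) - 1:
--             break
--         hash2 = ((hash2 << 5) + hash2) & 0xFFFFFFFF ^ ord(string[i + 1])
--
--     result = (hash1 + (hash2 * 1566083941)) & 0xFFFFFFFF
--     return result if result <= 0x7FFFFFFF else result - 0x100000000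
-- ===== SOURCE B (Python) =====
-- def get_stable_hash(string: str) -> int:
--     hash1 = 5381
--     for c in string[0::2]:
--         hash1 = ((hash1 << 5) + hash1) & 0xFFFFFFFF ^ ord(c)
--     hash2 = 5381
--     for c in string[1::2]:
--         hash2 = ((hash2 << 5) + hash2) & 0xFFFFFFFF ^ ord(c)
--     result = (hash1 + hash2 * 1566083941) & 0xFFFFFFFF
--     return result - 0x100000000 if result > 0x7FFFFFFF else result
-- ===== Notes on version B (the rewrite author's own statement) =====
-- stated objective: idiomatic
-- what changed: Replaces the strided index loop with its break and i/i+1 arithmetic by two independent folds of the same djb2-style step over the even-index and odd-index slices string[0::2] and string[1::2].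
import Mathlib
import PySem

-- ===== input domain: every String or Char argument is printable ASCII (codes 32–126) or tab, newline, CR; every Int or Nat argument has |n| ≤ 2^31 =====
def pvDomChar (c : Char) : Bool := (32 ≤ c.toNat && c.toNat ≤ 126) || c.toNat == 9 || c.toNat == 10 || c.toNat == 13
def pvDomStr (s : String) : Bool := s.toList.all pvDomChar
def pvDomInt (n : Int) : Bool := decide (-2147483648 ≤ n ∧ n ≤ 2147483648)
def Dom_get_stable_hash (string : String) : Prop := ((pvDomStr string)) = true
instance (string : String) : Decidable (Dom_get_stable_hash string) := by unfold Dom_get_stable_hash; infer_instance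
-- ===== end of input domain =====

-- B replaces A's strided index loop (with its break and i/i+1 arithmetic) by two
-- independent folds over the even- and odd-index slices; same value, no speed claim.

-- ===== PORT A =====
-- the for-loop over range(0, len(string), 2) with its early break, as index recursion;
-- every intermediate Python int here is nonnegative, so Nat accumulators are exact
def gsA_loop (cs : List Char) (n : Int) (i : Int) (h1 h2 : Nat) : Nat × Nat :=
  if _h : i < n then
    let h1' := (((h1 <<< 5) + h1) &&& 0xFFFFFFFF) ^^^ ((PySem.List.pyGet? cs i).getD ' ').toNat
    if i = n - 1 then (h1', h2)
    else
      let h2' := (((h2 <<< 5) + h2) &&& 0xFFFFFFFF) ^^^ ((PySem.List.pyGet? cs (i + 1)).getD ' ').toNat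
      gsA_loop cs n (i + 2) h1' h2'
  else (h1, h2)
termination_by (n - i).toNat
decreasing_by omega

def get_stable_hash (string : String) : Int :=
  let cs := string.toList
  let n : Int := cs.length
  let p := gsA_loop cs n 0 5381 5381
  let result := (p.1 + p.2 * 1566083941) &&& 0xFFFFFFFF
  if result ≤ 0x7FFFFFFF then (result : Int) else (result : Int) - 0x100000000

-- ===== PORT B =====
def gsB_step (h : Nat) (c : Char) : Nat := (((h <<< 5) + h) &&& 0xFFFFFFFF) ^^^ c.toNat

def get_stable_hash_alt (string : String) : Int :=
  let cs := string.toList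
  let h1 := ((PySem.List.slice? cs (some 0) none 2).getD []).foldl gsB_step 5381
  let h2 := ((PySem.List.slice? cs (some 1) none 2).getD []).foldl gsB_step 5381
  let result := (h1 + h2 * 1566083941) &&& 0xFFFFFFFF
  if result > 0x7FFFFFFF then (result : Int) - 0x100000000 else (result : Int)

-- ===== PRECONDITION & SPEC =====
def Spec_get_stable_hash (string : String) (out : Int) : Prop := out = get_stable_hash_alt string
instance (string : String) (out : Int) : Decidable (Spec_get_stable_hash string out) := by unfold Spec_get_stable_hash; infer_instance

-- ===== CLAIM (what is proved, stated in full; the proofs are below) =====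
def Claim_equal_get_stable_hash : Prop := ∀ (string : String), Dom_get_stable_hash string → Spec_get_stable_hash string (get_stable_hash string)

-- ===== LEMMAS AND PROOFS =====

-- even-index / odd-index elements of a list
def gsEvens {α : Type} : List α → List α
  | [] => []
  | [a] => [a]
  | a :: _ :: rest => a :: gsEvens rest

def gsOdds {α : Type} : List α → List α
  | [] => []
  | [_] => []
  | _ :: b :: rest => b :: gsOdds rest

-- A's loop, started at index pre.length of pre ++ rest, folds the step over the
-- even- and odd-index elements of rest
theorem gsA_loop_eq (rest : List Char) : ∀ (pre : List Char) (h1 h2 : Nat),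
    gsA_loop (pre ++ rest) ((pre.length + rest.length : Nat) : Int) (pre.length : Int) h1 h2
      = ((gsEvens rest).foldl gsB_step h1, (gsOdds rest).foldl gsB_step h2) := by
  induction rest using gsEvens.induct with
  | case1 =>
    intro pre h1 h2
    rw [gsA_loop]
    simp [gsEvens, gsOdds]
  | case2 a =>
    intro pre h1 h2
    rw [gsA_loop]
    rw [PySem.List.pyGet?_append_length]
    simp [gsEvens, gsOdds, gsB_step]
  | case3 a b rest ih =>
    intro pre h1 h2
    rw [gsA_loop]
    rw [show pre.length + (1:Int) = ((pre.length + 1 : Nat) : Int) by push_cast; ring,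
        show pre ++ a :: b :: rest = (pre ++ [a]) ++ (b :: rest) by simp,
        show ((pre.length + 1 : Nat) : Int) = ((pre ++ [a]).length : Int) by simp]
    rw [PySem.List.pyGet?_append_length]
    rw [show (pre ++ [a]) ++ (b :: rest) = pre ++ (a :: b :: rest) by simp,
        PySem.List.pyGet?_append_length]
    have hlt : (pre.length : Int) < ((pre.length + (a :: b :: rest).length : Nat) : Int) := by
      simp; omega
    have hne : ¬ ((pre.length : Int) = ((pre.length + (a :: b :: rest).length : Nat) : Int) - 1) := by
      simp; omega
    rw [dif_pos hlt, if_neg hne]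
    have := ih (pre ++ [a, b]) (gsB_step h1 a) (gsB_step h2 b)
    simp only [List.append_assoc, List.length_append, List.length_cons, List.length_nil] at this ⊢
    rw [show ((pre.length : Int) + 2) = (((pre.length + (1+1) : Nat)) : Int) by push_cast; ring]
    rw [show (pre.length + (0+1+1) + rest.length : Nat) = (pre.length + (rest.length +1+1) : Nat) by omega] at this
    simp [gsEvens, gsOdds, gsB_step] at this ⊢
    convert this using 3

-- the filterMap over range that slice? with step 2 produces, characterised
theorem fm_evens {α : Type} (cs : List α) :
    (List.range ((cs.length + 1) / 2)).filterMap (fun k => cs[2 * k]?) = gsEvens cs := by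
  induction cs using gsEvens.induct with
  | case1 => simp [gsEvens]
  | case2 a => simp [gsEvens]
  | case3 a b rest ih =>
    have hc : ((a :: b :: rest).length + 1) / 2 = (rest.length + 1) / 2 + 1 := by
      simp; omega
    rw [hc, List.range_succ_eq_map, List.filterMap_cons, List.filterMap_map]
    have hf : ((fun k => (a :: b :: rest)[2 * k]?) ∘ Nat.succ) = fun k => rest[2 * k]? := by
      funext k
      show (a :: b :: rest)[2 * (k + 1)]? = rest[2 * k]?
      rw [show 2 * (k + 1) = 2 * k + 1 + 1 by ring]
      simp
    rw [hf, ih]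
    simp [gsEvens]

theorem fm_odds {α : Type} (cs : List α) :
    (List.range (cs.length / 2)).filterMap (fun k => cs[2 * k + 1]?) = gsOdds cs := by
  induction cs using gsOdds.induct with
  | case1 => simp [gsOdds]
  | case2 a => simp [gsOdds]
  | case3 a b rest ih =>
    have hc : (a :: b :: rest).length / 2 = rest.length / 2 + 1 := by
      simp; omega
    rw [hc, List.range_succ_eq_map, List.filterMap_cons, List.filterMap_map]
    have hf : ((fun k => (a :: b :: rest)[2 * k + 1]?) ∘ Nat.succ) = fun k => rest[2 * k + 1]? := by
      funext k
      show (a :: b :: rest)[2 * (k + 1) + 1]? = rest[2 * k + 1]?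
      rw [show 2 * (k + 1) + 1 = 2 * k + 1 + 1 + 1 by ring]
      simp
    rw [hf, ih]
    simp [gsOdds]

theorem slice2_zero {α : Type} (cs : List α) :
    PySem.List.slice? cs (some 0) none 2 = some (gsEvens cs) := by
  rw [PySem.List.slice?]
  simp only [PySem.List.sliceIndices]
  norm_num
  rw [show (if 0 < cs.length then (((cs.length : Int) + 2 - 1) / 2).toNat else 0) = (cs.length + 1) / 2 from by split_ifs <;> omega]
  rw [show (fun x : Nat => cs[(2 * (x : Int)).toNat]?) = fun k : Nat => cs[2 * k]? from by
    funext k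
    rw [show (2 * (k : Int)).toNat = 2 * k from by omega]]
  exact fm_evens cs

theorem slice2_one {α : Type} (cs : List α) :
    PySem.List.slice? cs (some 1) none 2 = some (gsOdds cs) := by
  rw [PySem.List.slice?]
  simp only [PySem.List.sliceIndices]
  norm_num
  cases cs with
  | nil => simp [gsOdds]
  | cons c t =>
    rw [show min (1 : Int) ((c :: t).length : Int) = 1 from by simp]
    rw [show (if 1 < (c :: t).length then ((((c :: t).length : Int) - 1 + 2 - 1) / 2).toNat else 0) = (c :: t).length / 2 from by split_ifs <;> omega]
    rw [show (fun x : Nat => (c :: t)[(1 + 2 * (x : Int)).toNat]?) = fun k : Nat => (c :: t)[2 * k + 1]? from by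
      funext k
      rw [show (1 + 2 * (k : Int)).toNat = 2 * k + 1 from by omega]]
    exact fm_odds _

-- ===== VERDICT (by name: the statement is the Claim_ definition above) =====
theorem get_stable_hash_spec : Claim_equal_get_stable_hash := by
  intro s _
  unfold Spec_get_stable_hash get_stable_hash get_stable_hash_alt
  have h := gsA_loop_eq s.toList [] 5381 5381
  simp only [List.nil_append, List.length_nil, Nat.zero_add, Nat.cast_zero] at h
  simp only [h, slice2_zero, slice2_one, Option.getD_some]
  split_ifs <;> omega
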